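-- pv_equiv track=rewrite | github.com/eyereasoner/eye | logos/cases/aristotle_reductio_primes.py | new_prime_from_euclid
-- ===== SOURCE A (Python) =====
-- def prod(it):
--     """Simple product helper (exact integers)."""
--     out = 1
--     for x in it:
--         out *= x
--     return out
--
-- def trial_factor(n: int):
--     """
--     Trial-factor n > 1 into prime factors with exponents.
--     Returns list of (prime, exponent) pairs.
--     """
--     if n <= 1:
--         return []
--     factors = []
--     # small primes first
--     for p in [2, 3, 5]:
--         if n % p == 0:
--             e = 0
--             while n % p == 0:
--                 n //= p; e += 1
--             factors.append((p, e))
--     # wheel over 6k ± 1 candidates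
--     f = 7
--     step = 4  # alternates 4,2,4,2,... to generate 6k±1
--     while f * f <= n:
--         if n % f == 0:
--             e = 0
--             while n % f == 0:
--                 n //= f; e += 1
--             factors.append((f, e))
--         f += step
--         step = 6 - step
--     if n > 1:
--         factors.append((n, 1))
--     return factors
--
-- def euclid_number(primes_list):
--     """
--     Given a finite list of primes [p1,...,pk], return N = (p1*...*pk) + 1.
--     Core property: for any pi in the list, N % pi == 1.
--     """
--     return prod(primes_list) + 1
--
-- def new_prime_from_euclid(primes_list):
--     """
--     Compute a Euclid number, factor it, and return a prime divisor not in primes_list.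
--     This 'exhibits' a new prime, in line with Euclid's argument.
--     """
--     N = euclid_number(primes_list)
--     factors = trial_factor(N)
--     listed = set(primes_list)
--     for p, _ in factors:
--         if p not in listed:
--             return p, N, factors
--     # Should never happen if factorization is correct:
--     return None, N, factors
-- ===== SOURCE B (Python) =====
-- def new_prime_from_euclid(primes_list):
--     """
--     Compute a Euclid number, factor it, and return a prime divisor not in primes_list.
--     Recursive smallest-divisor factorization instead of the 2/3/5 + 6k±1 wheel.
--     """
--     N = 1
--     for x in primes_list:
--         N *= x
--     N += 1
--     factors = factorize(N, 2)
--     listed = set(primes_list)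
--     new_p = next((p for p, _ in factors if p not in listed), None)
--     return new_p, N, factors
--
--
-- def factorize(n, d):
--     """Ascending prime factorization of n (with exponents), recursing on the
--     smallest divisor >= d."""
--     if n <= 1:
--         return []
--     while d * d <= n and n % d != 0:
--         d += 1
--     if d * d > n:
--         return [(n, 1)]
--     e = 0
--     while n % d == 0:
--         n //= d
--         e += 1
--     return [(d, e)] + factorize(n, d + 1)
-- ===== Notes on version B (the rewrite author's own statement) =====
-- stated objective: simpler
-- what changed: Replaces the three-phase trial division (special-cased small primes 2/3/5 plus a 6k±1 wheel with an alternating step) by a single uniform recursion that strips the smallest divisor >= d and recurses on the cofactor; the new-prime selection becomes a next() over a generator.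
import Mathlib
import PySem

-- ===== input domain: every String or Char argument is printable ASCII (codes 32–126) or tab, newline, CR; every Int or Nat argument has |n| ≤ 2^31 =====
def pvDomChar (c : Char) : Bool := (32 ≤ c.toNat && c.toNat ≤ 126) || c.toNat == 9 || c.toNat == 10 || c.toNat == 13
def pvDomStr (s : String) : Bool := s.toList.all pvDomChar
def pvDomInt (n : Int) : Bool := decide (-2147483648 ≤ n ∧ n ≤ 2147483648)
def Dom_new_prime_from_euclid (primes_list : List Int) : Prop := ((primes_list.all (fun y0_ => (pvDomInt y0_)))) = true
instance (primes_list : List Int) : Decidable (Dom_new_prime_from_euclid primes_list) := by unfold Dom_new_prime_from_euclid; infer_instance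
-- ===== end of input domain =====

-- B replaces A's three-phase trial division (2/3/5 special cases + 6k±1 wheel) by one uniform
-- recursion on the smallest divisor; objective: simpler, same asymptotic cost.
-- All numbers fed to the factoring loops are positive (trial_factor returns [] for n ≤ 1),
-- so the loops are carried out on ℕ; the extra guards in the Lean loops (2 ≤ p, 0 < n,
-- step ∈ {2,4}, d < 2) only make the recursions total — they hold at every call site.

-- ===== PORT A =====
-- inner loop 'e = 0; while n % p == 0: n //= p; e += 1' of trial_factor; returns (final n, e)
def pvDivOutA (p n : Nat) : Nat × Nat :=
  if h : 2 ≤ p ∧ n % p = 0 ∧ 0 < n then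
    let r := pvDivOutA p (n / p)
    (r.1, r.2 + 1)
  else (n, 0)
termination_by n
decreasing_by exact Nat.div_lt_self h.2.2 (Nat.lt_of_lt_of_le Nat.one_lt_two h.1)

theorem pvDivOutA_fst_le (p n : Nat) : (pvDivOutA p n).1 ≤ n := by
  induction n using pvDivOutA.induct p with
  | case1 x h ih =>
    rw [pvDivOutA]; simp only [dif_pos h]
    exact le_trans ih (Nat.div_le_self x p)
  | case2 x h => rw [pvDivOutA]; simp [h]

theorem pvDivOutA_fst_le_div (p n : Nat) (hp : 2 ≤ p) (hd : n % p = 0) (hn : 0 < n) :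
    (pvDivOutA p n).1 ≤ n / p := by
  rw [pvDivOutA]; rw [dif_pos (And.intro hp (And.intro hd hn))]
  exact pvDivOutA_fst_le p (n / p)

theorem pvDivOutA_fst_lt (p n : Nat) (hp : 2 ≤ p) (hd : n % p = 0) (hn : 0 < n) :
    (pvDivOutA p n).1 < n :=
  lt_of_le_of_lt (pvDivOutA_fst_le_div p n hp hd hn) (Nat.div_lt_self hn (by omega))

-- wheel loop of trial_factor: 'while f*f <= n: …; f += step; step = 6 - step', plus the
-- trailing 'if n > 1: factors.append((n,1))'
-- fuel only bounds the recursion depth: every call site passes fuel > 2*n - f, which the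
-- loop measure (2*n - f, strictly decreasing: pvWheelDec1/pvWheelDec2) never exhausts
def pvWheelA (fuel n f step : Nat) : List (Nat × Nat) :=
  match fuel with
  | 0 => []
  | fuel + 1 =>
    if f * f ≤ n then
      if n % f = 0 then
        (f, (pvDivOutA f n).2) :: pvWheelA fuel (pvDivOutA f n).1 (f + step) (6 - step)
      else pvWheelA fuel n (f + step) (6 - step)
    else if 1 < n then [(n, 1)] else []

-- body of the 'for p in [2, 3, 5]' loop (state: current n, factors so far)
def pvSmallStep (st : Nat × List (Nat × Nat)) (p : Nat) : Nat × List (Nat × Nat) :=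
  if st.1 % p = 0 then
    ((pvDivOutA p st.1).1, st.2 ++ [(p, (pvDivOutA p st.1).2)])
  else st

def pvTrialFactorA (n : Nat) : List (Nat × Nat) :=
  if n ≤ 1 then []
  else
    let st := [2, 3, 5].foldl pvSmallStep (n, [])
    st.2 ++ pvWheelA (2 * st.1 + 1) st.1 7 4

-- 'for p, _ in factors: if p not in listed: return p' — first factor not listed
def pvScanA (listed : PySem.Set Int) : List (Int × Int) → Option Int
  | [] => none
  | pe :: rest =>
    if PySem.Set.contains listed pe.1 then pvScanA listed rest else some pe.1

def new_prime_from_euclid (primes_list : List Int) : Option Int × Int × (List (Int × Int)) :=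
  let N : Int := (primes_list.foldl (fun out x => out * x) 1) + 1
  let factors : List (Int × Int) :=
    (pvTrialFactorA N.toNat).map (fun pe => ((pe.1 : Int), (pe.2 : Int)))
  let listed : PySem.Set Int := PySem.Set.ofList primes_list
  (pvScanA listed factors, N, factors)

-- ===== PORT B =====
-- B's inner 'while n % d == 0' loop (same code as A's inner loop, ported separately)
def pvDivOutB (p n : Nat) : Nat × Nat :=
  if h : 2 ≤ p ∧ n % p = 0 ∧ 0 < n then
    let r := pvDivOutB p (n / p)
    (r.1, r.2 + 1)
  else (n, 0)
termination_by n
decreasing_by exact Nat.div_lt_self h.2.2 (Nat.lt_of_lt_of_le Nat.one_lt_two h.1)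

theorem pvDivOutB_eq_A (p n : Nat) : pvDivOutB p n = pvDivOutA p n := by
  induction n using pvDivOutB.induct p with
  | case1 x h ih => rw [pvDivOutB, pvDivOutA]; simp only [dif_pos h, ih]
  | case2 x h => rw [pvDivOutB, pvDivOutA]; simp [h]

theorem pvAdvanceDec (n d : Nat) (h : d * d ≤ n ∧ n % d ≠ 0) :
    n + 1 - (d + 1) < n + 1 - d := by
  rcases Nat.eq_zero_or_pos d with hd | hd
  · subst hd; omega
  · have : d ≤ d * d := Nat.le_mul_of_pos_left d hd
    omega

-- B's 'while d * d <= n and n % d != 0: d += 1'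
def pvAdvanceB (n d : Nat) : Nat :=
  if h : d * d ≤ n ∧ n % d ≠ 0 then pvAdvanceB n (d + 1) else d
termination_by n + 1 - d
decreasing_by exact pvAdvanceDec n d h

theorem pvAdvanceB_ge (n d : Nat) : d ≤ pvAdvanceB n d := by
  induction d using pvAdvanceB.induct n with
  | case1 x h ih => rw [pvAdvanceB]; simp only [dif_pos h]; omega
  | case2 x h => rw [pvAdvanceB]; simp [h]

theorem pvAdvanceB_post (n d : Nat) :
    n % pvAdvanceB n d = 0 ∨ n < pvAdvanceB n d * pvAdvanceB n d := by
  induction d using pvAdvanceB.induct n with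
  | case1 x h ih => rw [pvAdvanceB]; simp only [dif_pos h]; exact ih
  | case2 x h =>
    rw [pvAdvanceB]; simp only [dif_neg h]
    by_cases hm : n % x = 0
    · exact Or.inl hm
    · exact Or.inr (by omega)

theorem pvDivOutB_fst_lt (p n : Nat) (hp : 2 ≤ p) (hd : n % p = 0) (hn : 0 < n) :
    (pvDivOutB p n).1 < n := by
  rw [pvDivOutB_eq_A]; exact pvDivOutA_fst_lt p n hp hd hn

theorem pvFactDec (n d : Nat) (h1 : ¬ n ≤ 1) (h2 : ¬ d < 2)
    (h3 : ¬ n < pvAdvanceB n d * pvAdvanceB n d) :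
    (pvDivOutB (pvAdvanceB n d) n).1 < n := by
  have hge : d ≤ pvAdvanceB n d := pvAdvanceB_ge n d
  have hmod : n % pvAdvanceB n d = 0 := by
    rcases pvAdvanceB_post n d with h | h
    · exact h
    · omega
  exact pvDivOutB_fst_lt _ _ (by omega) hmod (by omega)

-- recursive factorize(n, d): advance d to the smallest divisor, strip it, recurse.
-- 'd < 2' never holds at a call site (factorize is entered with d = 2, then d'+1 ≥ 3):
-- the branch is a totality guard only.
def pvFactorizeB (n d : Nat) : List (Nat × Nat) :=
  if n ≤ 1 then []
  else if d < 2 then []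
  else if n < pvAdvanceB n d * pvAdvanceB n d then [(n, 1)]
  else
    (pvAdvanceB n d, (pvDivOutB (pvAdvanceB n d) n).2) ::
      pvFactorizeB (pvDivOutB (pvAdvanceB n d) n).1 (pvAdvanceB n d + 1)
termination_by n
decreasing_by exact pvFactDec n d (by assumption) (by assumption) (by assumption)

def new_prime_from_euclid_alt (primes_list : List Int) : Option Int × Int × (List (Int × Int)) :=
  let N : Int := (primes_list.foldl (fun out x => out * x) 1) + 1
  let factors : List (Int × Int) :=
    (pvFactorizeB N.toNat 2).map (fun pe => ((pe.1 : Int), (pe.2 : Int)))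
  let listed : PySem.Set Int := PySem.Set.ofList primes_list
  let new_p := (factors.find? (fun pe => ! PySem.Set.contains listed pe.1)).map Prod.fst
  (new_p, N, factors)

-- ===== PRECONDITION & SPEC =====
def Spec_new_prime_from_euclid (primes_list : List Int) (out : Option Int × Int × (List (Int × Int))) : Prop := out = new_prime_from_euclid_alt primes_list
instance (primes_list : List Int) (out : Option Int × Int × (List (Int × Int))) : Decidable (Spec_new_prime_from_euclid primes_list out) := by unfold Spec_new_prime_from_euclid; infer_instance

-- ===== CLAIM (what is proved, stated in full; the proofs are below) =====
def Claim_equal_new_prime_from_euclid : Prop := ∀ (primes_list : List Int), Dom_new_prime_from_euclid primes_list → Spec_new_prime_from_euclid primes_list (new_prime_from_euclid primes_list)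

-- ===== LEMMAS AND PROOFS =====

theorem pvWheelDec1 (n f step : Nat) (h : f * f ≤ n ∧ 2 ≤ f ∧ (step = 2 ∨ step = 4))
    (hd : n % f = 0) : 2 * (pvDivOutA f n).1 - (f + step) < 2 * n - f := by
  have h4 : 2 * 2 ≤ f * f := Nat.mul_le_mul h.2.1 h.2.1
  have h2f : 2 * f ≤ f * f := Nat.mul_le_mul_right f h.2.1
  have hn0 : 0 < n := by omega
  have hle : (pvDivOutA f n).1 ≤ n / f := pvDivOutA_fst_le_div f n h.2.1 hd hn0
  have hdiv : n / f ≤ n / 2 := Nat.div_le_div_left h.2.1 (by omega)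
  rcases h.2.2 with hs | hs <;> omega

theorem pvWheelDec2 (n f step : Nat) (h : f * f ≤ n ∧ 2 ≤ f ∧ (step = 2 ∨ step = 4)) :
    2 * n - (f + step) < 2 * n - f := by
  have h4 : 2 * 2 ≤ f * f := Nat.mul_le_mul h.2.1 h.2.1
  have h2f : 2 * f ≤ f * f := Nat.mul_le_mul_right f h.2.1
  rcases h.2.2 with hs | hs <;> omega

theorem pvAdvanceB_skip (n d : Nat) :
    ∀ k, d ≤ k → k < pvAdvanceB n d → n % k ≠ 0 := by
  induction d using pvAdvanceB.induct n with
  | case1 x h ih =>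
    intro k hk1 hk2
    rw [pvAdvanceB] at hk2; simp only [dif_pos h] at hk2
    rcases Nat.eq_or_lt_of_le hk1 with rfl | hlt
    · exact h.2
    · exact ih k hlt hk2
  | case2 x h =>
    intro k hk1 hk2
    rw [pvAdvanceB] at hk2; simp only [dif_neg h] at hk2; omega


theorem pvDivOutA_fst_dvd (p n : Nat) : (pvDivOutA p n).1 ∣ n := by
  induction n using pvDivOutA.induct p with
  | case1 x h ih =>
    rw [pvDivOutA]; simp only [dif_pos h]
    exact dvd_trans ih (Nat.div_dvd_of_dvd (Nat.dvd_of_mod_eq_zero h.2.1))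
  | case2 x h => rw [pvDivOutA]; simp [h]

theorem pvDivOutA_fst_pos (p n : Nat) (hn : 0 < n) : 0 < (pvDivOutA p n).1 := by
  induction n using pvDivOutA.induct p with
  | case1 x h ih =>
    rw [pvDivOutA]; simp only [dif_pos h]
    exact ih (Nat.div_pos (Nat.le_of_dvd h.2.2 (Nat.dvd_of_mod_eq_zero h.2.1)) (by omega))
  | case2 x h =>
    rw [pvDivOutA]; simp only [dif_neg h]
    exact hn

theorem pvDivOutA_not_dvd (p n : Nat) (hp : 2 ≤ p) (hn : 0 < n) :
    ¬ p ∣ (pvDivOutA p n).1 := by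
  induction n using pvDivOutA.induct p with
  | case1 x h ih =>
    rw [pvDivOutA]; simp only [dif_pos h]
    exact ih (Nat.div_pos (Nat.le_of_dvd h.2.2 (Nat.dvd_of_mod_eq_zero h.2.1)) (by omega))
  | case2 x h =>
    rw [pvDivOutA]; simp only [dif_neg h]
    intro hdvd
    exact h ⟨hp, Nat.dvd_iff_mod_eq_zero.mp hdvd, hn⟩

theorem pvDivOutA_one (p : Nat) (hp : 2 ≤ p) : pvDivOutA p 1 = (1, 0) := by
  rw [pvDivOutA]
  rw [dif_neg (by simp [Nat.mod_eq_of_lt (by omega : 1 < p)])]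

theorem pvDivOutA_self (n : Nat) (hn : 2 ≤ n) : pvDivOutA n n = (1, 1) := by
  rw [pvDivOutA]
  rw [dif_pos (And.intro hn (And.intro (Nat.mod_self n) (by omega)))]
  rw [Nat.div_self (by omega : 0 < n), pvDivOutA_one n hn]

theorem pvRefDec (n : Nat) (hn : ¬ n ≤ 1) : (pvDivOutA n.minFac n).1 < n :=
  pvDivOutA_fst_lt _ _ (Nat.minFac_prime (by omega : n ≠ 1)).two_le
    (Nat.dvd_iff_mod_eq_zero.mp (Nat.minFac_dvd n)) (by omega)

-- reference: ascending prime factorization, stripping Nat.minFac at each step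
def pvRef (n : Nat) : List (Nat × Nat) :=
  if _hn : n ≤ 1 then []
  else (n.minFac, (pvDivOutA n.minFac n).2) :: pvRef (pvDivOutA n.minFac n).1
termination_by n
decreasing_by exact pvRefDec n _hn

theorem pvMinFac_eq_of (n p : Nat) (hn : 2 ≤ n) (hp : 2 ≤ p) (hd : p ∣ n)
    (hmin : ∀ k, 2 ≤ k → k < p → ¬ k ∣ n) : n.minFac = p := by
  apply le_antisymm (Nat.minFac_le_of_dvd hp hd)
  by_contra hlt
  rw [not_le] at hlt
  exact hmin _ (Nat.minFac_prime (by omega : n ≠ 1)).two_le hlt (Nat.minFac_dvd n)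

theorem pvMinFac_self_of (n b : Nat) (hn : 2 ≤ n) (hb : n < b * b)
    (hmin : ∀ k, 2 ≤ k → k < b → ¬ k ∣ n) : n.minFac = n := by
  by_cases hp : n.Prime
  · exact hp.minFac_eq
  · exfalso
    have hsq : n.minFac ^ 2 ≤ n := Nat.minFac_sq_le_self (by omega) hp
    have h2 : 2 ≤ n.minFac := (Nat.minFac_prime (by omega : n ≠ 1)).two_le
    have hge : b ≤ n.minFac := by
      by_contra hc
      rw [not_le] at hc
      exact hmin _ h2 hc (Nat.minFac_dvd n)
    have : b * b ≤ n.minFac * n.minFac := Nat.mul_le_mul hge hge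
    rw [pow_two] at hsq
    omega

theorem pvRef_prime (n : Nat) (hn : 2 ≤ n) (hmf : n.minFac = n) : pvRef n = [(n, 1)] := by
  rw [pvRef]
  rw [dif_neg (by omega : ¬ n ≤ 1)]
  rw [hmf, pvDivOutA_self n hn]
  rw [pvRef]
  rfl

theorem pvRef_cons (n p : Nat) (hn : 2 ≤ n) (hmf : n.minFac = p) :
    pvRef n = (p, (pvDivOutA p n).2) :: pvRef (pvDivOutA p n).1 := by
  rw [pvRef]
  rw [dif_neg (by omega : ¬ n ≤ 1), hmf]

-- ==== B equals the reference ====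
theorem pvFactB_eq_ref (n d : Nat) (hd : 2 ≤ d)
    (hmin : ∀ k, 2 ≤ k → k < d → ¬ k ∣ n) : pvFactorizeB n d = pvRef n := by
  induction n, d using pvFactorizeB.induct with
  | case1 n d h => rw [pvFactorizeB, pvRef]; simp [h]
  | case2 n d h1 h2 => omega
  | case3 n d h1 h2 h3 =>
    -- n < d'*d'
    have hn2 : 2 ≤ n := by omega
    have hmin' : ∀ k, 2 ≤ k → k < pvAdvanceB n d → ¬ k ∣ n := by
      intro k hk1 hk2 hk3
      rcases Nat.lt_or_ge k d with hlt | hge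
      · exact hmin k hk1 hlt hk3
      · exact pvAdvanceB_skip n d k hge hk2 (Nat.dvd_iff_mod_eq_zero.mp hk3)
    rw [pvFactorizeB]
    rw [if_neg (by omega : ¬ n ≤ 1), if_neg h2, if_pos h3]
    exact (pvRef_prime n hn2 (pvMinFac_self_of n (pvAdvanceB n d) hn2 h3 hmin')).symm
  | case4 n d h1 h2 h3 ih =>
    have hn2 : 2 ≤ n := by omega
    have hge : d ≤ pvAdvanceB n d := pvAdvanceB_ge n d
    have hd2 : 2 ≤ pvAdvanceB n d := by omega
    have hmod : n % pvAdvanceB n d = 0 := by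
      rcases pvAdvanceB_post n d with h | h
      · exact h
      · omega
    have hmin' : ∀ k, 2 ≤ k → k < pvAdvanceB n d → ¬ k ∣ n := by
      intro k hk1 hk2 hk3
      rcases Nat.lt_or_ge k d with hlt | hge'
      · exact hmin k hk1 hlt hk3
      · exact pvAdvanceB_skip n d k hge' hk2 (Nat.dvd_iff_mod_eq_zero.mp hk3)
    have hmf : n.minFac = pvAdvanceB n d :=
      pvMinFac_eq_of n _ hn2 hd2 (Nat.dvd_of_mod_eq_zero hmod) hmin'
    rw [pvFactorizeB]
    rw [if_neg (by omega : ¬ n ≤ 1), if_neg h2, if_neg h3]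
    rw [pvRef_cons n (pvAdvanceB n d) hn2 hmf, pvDivOutB_eq_A]
    congr 1
    rw [← pvDivOutB_eq_A]
    apply ih (by omega)
    rw [pvDivOutB_eq_A]
    intro k hk1 hk2 hk3
    have hkn : k ∣ n := hk3.trans (pvDivOutA_fst_dvd _ _)
    rcases Nat.lt_or_ge k (pvAdvanceB n d) with hlt | hge'
    · exact hmin' k hk1 hlt hkn
    · have hkeq : k = pvAdvanceB n d := by omega
      rw [hkeq] at hk3
      exact pvDivOutA_not_dvd _ n (by omega) (by omega) hk3

-- ==== A's wheel equals the reference ====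
theorem pvWheelA_eq_ref (fuel : Nat) : ∀ (n f step : Nat), 2 * n - f < fuel →
    (f % 6 = 1 ∧ step = 4 ∨ f % 6 = 5 ∧ step = 2) → 7 ≤ f →
    (∀ k, 2 ≤ k → k < f → ¬ k ∣ n) → pvWheelA fuel n f step = pvRef n := by
  induction fuel with
  | zero => intro n f step hfuel _ _ _; omega
  | succ fuel ih =>
    intro n f step hfuel h6 hf hmin
    have hstep : step = 2 ∨ step = 4 := by
      rcases h6 with ⟨_, h2⟩ | ⟨_, h2⟩ <;> omega
    rw [pvWheelA]
    by_cases hle : f * f ≤ n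
    · have hand : f * f ≤ n ∧ 2 ≤ f ∧ (step = 2 ∨ step = 4) := ⟨hle, by omega, hstep⟩
      have hn2 : 2 ≤ n := by nlinarith [hle]
      have h2n : ¬ 2 ∣ n := hmin 2 (by omega) (by omega)
      have h3n : ¬ 3 ∣ n := hmin 3 (by omega) (by omega)
      have h6' : (f + step) % 6 = 1 ∧ 6 - step = 4 ∨ (f + step) % 6 = 5 ∧ 6 - step = 2 := by
        rcases h6 with ⟨h1, h2⟩ | ⟨h1, h2⟩ <;> subst h2 <;> [right; left] <;> constructor <;> omega
      have hf' : 7 ≤ f + step := by omega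
      by_cases hd : n % f = 0
      · rw [if_pos hle, if_pos hd]
        have hmf : n.minFac = f :=
          pvMinFac_eq_of n f hn2 (by omega) (Nat.dvd_of_mod_eq_zero hd) hmin
        rw [pvRef_cons n f hn2 hmf]
        congr 1
        apply ih _ _ _ (by have := pvWheelDec1 n f step hand hd; omega) h6' hf'
        intro k hk1 hk2 hk3
        have hkn : k ∣ n := hk3.trans (pvDivOutA_fst_dvd _ _)
        rcases Nat.lt_or_ge k f with hlt | hge
        · exact hmin k hk1 hlt hkn
        · rcases Nat.eq_or_lt_of_le hge with heq | hgt
          · rw [← heq] at hk3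
            exact pvDivOutA_not_dvd _ n (by omega) (by omega) hk3
          · have hk23 : k % 2 = 0 ∨ k % 3 = 0 := by
              rcases h6 with ⟨h1, h2⟩ | ⟨h1, h2⟩ <;> omega
            rcases hk23 with hke | hkt
            · exact h2n ((Nat.dvd_of_mod_eq_zero hke).trans hkn)
            · exact h3n ((Nat.dvd_of_mod_eq_zero hkt).trans hkn)
      · rw [if_pos hle, if_neg hd]
        apply ih _ _ _ (by have := pvWheelDec2 n f step hand; omega) h6' hf'
        intro k hk1 hk2 hk3
        rcases Nat.lt_or_ge k f with hlt | hge
        · exact hmin k hk1 hlt hk3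
        · rcases Nat.eq_or_lt_of_le hge with heq | hgt
          · rw [← heq] at hk3
            exact hd (Nat.dvd_iff_mod_eq_zero.mp hk3)
          · have hk23 : k % 2 = 0 ∨ k % 3 = 0 := by
              rcases h6 with ⟨h1, h2⟩ | ⟨h1, h2⟩ <;> omega
            rcases hk23 with hke | hkt
            · exact h2n ((Nat.dvd_of_mod_eq_zero hke).trans hk3)
            · exact h3n ((Nat.dvd_of_mod_eq_zero hkt).trans hk3)
    · rw [if_neg hle]
      by_cases hn1 : 1 < n
      · rw [if_pos hn1]
        exact (pvRef_prime n (by omega) (pvMinFac_self_of n f (by omega) (by omega) hmin)).symm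
      · rw [if_neg hn1, pvRef]
        rw [dif_pos (by omega : n ≤ 1)]

-- ==== one small-prime step of A's front loop ====
theorem pvSmallStep_spec (n : Nat) (fs : List (Nat × Nat)) (p : Nat) (hp : 2 ≤ p)
    (hn : 0 < n) (hmin : ∀ k, 2 ≤ k → k < p → ¬ k ∣ n) :
    ∃ n' fs', pvSmallStep (n, fs) p = (n', fs ++ fs') ∧ pvRef n = fs' ++ pvRef n' ∧
      ¬ p ∣ n' ∧ (∀ k, k ∣ n' → k ∣ n) ∧ 0 < n' := by
  by_cases hdvd : n % p = 0
  · have hpn : p ∣ n := Nat.dvd_of_mod_eq_zero hdvd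
    have hn2 : 2 ≤ n := le_trans hp (Nat.le_of_dvd hn hpn)
    have hmf : n.minFac = p := pvMinFac_eq_of n p hn2 hp hpn hmin
    refine ⟨(pvDivOutA p n).1, [(p, (pvDivOutA p n).2)], ?_, ?_, ?_, ?_, ?_⟩
    · simp [pvSmallStep, hdvd]
    · rw [pvRef_cons n p hn2 hmf]; rfl
    · exact pvDivOutA_not_dvd p n hp hn
    · exact fun k hk => hk.trans (pvDivOutA_fst_dvd p n)
    · exact pvDivOutA_fst_pos p n hn
  · refine ⟨n, [], ?_, by simp, ?_, fun k hk => hk, hn⟩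
    · simp [pvSmallStep, hdvd]
    · exact fun hdd => hdvd (Nat.dvd_iff_mod_eq_zero.mp hdd)

-- ==== A equals the reference ====
theorem pvTrialA_eq_ref (n : Nat) : pvTrialFactorA n = pvRef n := by
  rw [pvTrialFactorA]
  by_cases hn : n ≤ 1
  · rw [if_pos hn, pvRef, dif_pos hn]
  · rw [if_neg hn]
    have hn0 : 0 < n := by omega
    obtain ⟨n1, g1, e1, r1, nd1, dv1, pos1⟩ :=
      pvSmallStep_spec n [] 2 (by omega) hn0 (by intro k hk1 hk2; omega)
    obtain ⟨n2, g2, e2, r2, nd2, dv2, pos2⟩ :=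
      pvSmallStep_spec n1 ([] ++ g1) 3 (by omega) pos1 (by
        intro k hk1 hk2 hk3
        have : k = 2 := by omega
        subst this; exact nd1 hk3)
    obtain ⟨n3, g3, e3, r3, nd3, dv3, pos3⟩ :=
      pvSmallStep_spec n2 (([] ++ g1) ++ g2) 5 (by omega) pos2 (by
        intro k hk1 hk2 hk3
        interval_cases k
        · exact nd1 (dv2 2 hk3)
        · exact nd2 hk3
        · exact nd1 (dv2 2 (dvd_trans (by norm_num) hk3)))
    have hfold : [2, 3, 5].foldl pvSmallStep (n, []) = (n3, (([] ++ g1) ++ g2) ++ g3) := by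
      simp only [List.foldl]
      rw [e1, e2, e3]
    rw [hfold]
    show ([] ++ g1 ++ g2 ++ g3) ++ pvWheelA (2 * n3 + 1) n3 7 4 = pvRef n
    have hw : pvWheelA (2 * n3 + 1) n3 7 4 = pvRef n3 := by
      apply pvWheelA_eq_ref (2 * n3 + 1) n3 7 4 (by omega) (by omega) (by omega)
      intro k hk1 hk2 hk3
      interval_cases k
      · exact nd1 (dv2 2 (dv3 2 hk3))
      · exact nd2 (dv3 3 hk3)
      · exact nd1 (dv2 2 (dv3 2 (dvd_trans (by norm_num) hk3)))
      · exact nd3 hk3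
      · exact nd1 (dv2 2 (dv3 2 (dvd_trans (by norm_num) hk3)))
    rw [hw, r1, r2, r3]
    simp

-- ==== the selection scan ====
theorem pvScanA_eq_find (listed : PySem.Set Int) (l : List (Int × Int)) :
    pvScanA listed l = (l.find? (fun pe => ! PySem.Set.contains listed pe.1)).map Prod.fst := by
  induction l with
  | nil => rfl
  | cons pe rest ih =>
    by_cases hc : PySem.Set.contains listed pe.1
    · rw [pvScanA, if_pos hc, List.find?_cons_of_neg (by simpa using hc), ih]
    · rw [pvScanA, if_neg hc, List.find?_cons_of_pos (by simpa using hc)]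
      rfl

-- ===== VERDICT (by name: the statement is the Claim_ definition above) =====
theorem new_prime_from_euclid_spec : Claim_equal_new_prime_from_euclid := by
  intro primes_list _
  unfold Spec_new_prime_from_euclid new_prime_from_euclid new_prime_from_euclid_alt
  have hfac : pvTrialFactorA ((primes_list.foldl (fun out x => out * x) 1) + 1).toNat =
      pvFactorizeB ((primes_list.foldl (fun out x => out * x) 1) + 1).toNat 2 := by
    rw [pvTrialA_eq_ref, pvFactB_eq_ref _ 2 (by omega) (by intro k hk1 hk2; omega)]
  simp only [hfac, pvScanA_eq_find]
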